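-- pv_equiv track=rewrite | github.com/Soreseth/Masterthesis | src/evaluation/blind_baseline.py | count_unique_ngrams
-- ===== SOURCE A (Python) =====
-- import itertools
-- from collections import defaultdict
--
-- def ngrams(s, n=5):
--     """Return the set of all character n-grams for N <= n."""
--     if n == 1:
--         return set(s)
--     iters = itertools.tee(s, n)
--     for i, it in enumerate(iters):
--         next(itertools.islice(it, i, i), None)
--     return set("".join(x) for x in zip(*iters)).union(ngrams(s, n - 1))
--
-- def count_unique_ngrams(lines, n=5, threshold=None):
--     """For each n-gram, return the set of line indices containing it."""
--     char_counts = defaultdict(set)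
--     for i, line in enumerate(lines):
--         unique_chars = ngrams(line, n=n)
--         for char in unique_chars:
--             char_counts[char].add(i)
--     if threshold is not None:
--         for c in list(char_counts.keys()):
--             if len(char_counts[c]) < threshold:
--                 del char_counts[c]
--     return char_counts
-- ===== SOURCE B (Python) =====
-- def count_unique_ngrams(lines, n=5, threshold=None):
--     """For each n-gram, return the set of line indices containing it."""
--     counts = {}
--     for i, line in enumerate(lines):
--         grams = set()
--         for k in range(min(n, len(line)), 0, -1):
--             for j in range(len(line) - k + 1):
--                 grams.add(line[j:j + k])
--         for g in grams:
--             counts.setdefault(g, set()).add(i)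
--     if threshold is None:
--         return counts
--     return {g: s for g, s in counts.items() if len(s) >= threshold}
-- ===== Notes on version B (the rewrite author's own statement) =====
-- stated objective: simpler
-- what changed: B replaces A's recursive ngrams helper built from itertools.tee/islice/zip (one recursion level per gram length) by two plain index loops that slice each k-gram directly (k capped at the line length), and replaces A's key-deletion pass over the dict by a filtered dict comprehension.
import Mathlib
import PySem

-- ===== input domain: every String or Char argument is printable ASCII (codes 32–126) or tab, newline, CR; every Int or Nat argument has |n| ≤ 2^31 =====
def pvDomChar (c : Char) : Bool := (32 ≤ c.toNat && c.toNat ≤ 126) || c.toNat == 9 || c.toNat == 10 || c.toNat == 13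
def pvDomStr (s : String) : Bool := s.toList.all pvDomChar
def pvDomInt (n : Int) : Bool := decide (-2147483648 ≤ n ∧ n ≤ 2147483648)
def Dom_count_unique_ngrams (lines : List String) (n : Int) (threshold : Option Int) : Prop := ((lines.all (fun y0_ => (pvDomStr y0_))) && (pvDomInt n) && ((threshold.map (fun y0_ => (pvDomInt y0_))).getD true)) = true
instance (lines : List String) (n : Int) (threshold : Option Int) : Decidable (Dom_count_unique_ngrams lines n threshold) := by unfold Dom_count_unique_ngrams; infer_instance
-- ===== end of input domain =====

-- B replaces A's recursive tee/islice/zip n-gram generation by direct index slicing (gram length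
-- capped at the line length) and A's key-deletion pass by a filtered dict comprehension;
-- a timing run measured B faster.

-- ===== PORT A =====

-- zip(*iters): emit the tuple of current heads while EVERY iterator still has an element
-- (exact for the nonempty iterator tuples A builds; l0 is the first iterator, rest the others).
def pvZipHeads (l0 : List Char) (rest : List (List Char)) : List (List Char) :=
  match l0 with
  | [] => []
  | c :: t =>
    if rest.all (fun l => !l.isEmpty) then
      (c :: rest.map (fun l => l.headD ' ')) :: pvZipHeads t (rest.map List.tail)
    else []

-- ngrams(s, n): 'iters = tee(s, n)' with iterator i advanced i times by 'next(islice(it, i, i), None)'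
-- is the family of suffixes s[i:]; zip over them yields the length-n windows.
-- The guard 'n ≤ 1' is A's 'n == 1' base case; it also totalizes the n < 1 inputs (outside Pre_,
-- where A's recursion never reaches the base case and raises RecursionError).
def pvNgrams (s : String) (n : Int) : PySem.Set String :=
  if _h : n ≤ 1 then
    PySem.Set.ofList (s.toList.map (fun c => String.ofList [c]))        -- set(s)
  else
    let tuples := pvZipHeads s.toList ((List.range' 1 (n.toNat - 1)).map (fun i => s.toList.drop i))
    PySem.Set.union (PySem.Set.ofList (tuples.map (fun x => String.ofList x))) (pvNgrams s (n - 1))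
termination_by n.toNat
decreasing_by simp at _h; omega

def count_unique_ngrams (lines : List String) (n : Int) (threshold : Option Int) : List (String × List Int) :=
  let char_counts : PySem.Dict String (PySem.Set Int) :=
    (PySem.List.enumerate lines 0).foldl
      (fun d p =>
        (pvNgrams p.2 n).foldl
          (fun d g => PySem.Dict.modify d g PySem.Set.empty (fun s => PySem.Set.add s p.1)) d)
      PySem.Dict.empty
  match threshold with
  | none => char_counts.items
  | some t =>
    (char_counts.keys.foldl
      (fun d c => if PySem.Set.len (PySem.Dict.getD d c PySem.Set.empty) < t then d.erase c else d)
      char_counts).items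

-- ===== PORT B =====

-- the k-grams of line for k = min(n, len(line)) down to 1, by direct slicing
def pvGrams (line : String) (n : Int) : PySem.Set String :=
  (PySem.List.pyRange (min n (PySem.Str.len line)) 0 (-1)).foldl
    (fun gs k =>
      (PySem.List.pyRange 0 (PySem.Str.len line - k + 1) 1).foldl
        (fun gs j => PySem.Set.add gs (PySem.Str.slice line (some j) (some (j + k)))) gs)
    PySem.Set.empty

def count_unique_ngrams_alt (lines : List String) (n : Int) (threshold : Option Int) : List (String × List Int) :=
  let counts : PySem.Dict String (PySem.Set Int) :=
    (PySem.List.enumerate lines 0).foldl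
      (fun d p =>
        (pvGrams p.2 n).foldl
          (fun d g => PySem.Dict.insert d g (PySem.Set.add (PySem.Dict.getD d g PySem.Set.empty) p.1)) d)
      PySem.Dict.empty
  match threshold with
  | none => counts.items
  | some t => counts.items.filter (fun q => decide (t ≤ PySem.Set.len q.2))

-- ===== PRECONDITION & SPEC =====
-- Pre_ excludes exactly the inputs on which A raises: a NONEMPTY lines list with n ≤ 0, where
-- ngrams' recursion 'ngrams(s, n-1)' never reaches its 'n == 1' base case and raises
-- RecursionError; with an empty lines list ngrams is never called and A returns normally for
-- every n, so those inputs stay inside Pre_.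
def Pre_count_unique_ngrams (lines : List String) (n : Int) (threshold : Option Int) : Prop :=
  1 ≤ n ∨ lines = []
instance (lines : List String) (n : Int) (threshold : Option Int) : Decidable (Pre_count_unique_ngrams lines n threshold) := by unfold Pre_count_unique_ngrams; infer_instance

def pvWitness_count_unique_ngrams : List String × Int × Option Int := (["ab", "b c"], 3, some 1)

def Spec_count_unique_ngrams (lines : List String) (n : Int) (threshold : Option Int) (out : List (String × List Int)) : Prop := out = count_unique_ngrams_alt lines n threshold
instance (lines : List String) (n : Int) (threshold : Option Int) (out : List (String × List Int)) : Decidable (Spec_count_unique_ngrams lines n threshold out) := by unfold Spec_count_unique_ngrams; infer_instance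

-- ===== CLAIM (what is proved, stated in full; the proofs are below) =====
def Claim_equal_count_unique_ngrams : Prop := ∀ (lines : List String) (n : Int) (threshold : Option Int), Dom_count_unique_ngrams lines n threshold → Pre_count_unique_ngrams lines n threshold → Spec_count_unique_ngrams lines n threshold (count_unique_ngrams lines n threshold)

-- ===== LEMMAS AND PROOFS =====

theorem pvWitness_ok :
    Dom_count_unique_ngrams pvWitness_count_unique_ngrams.1 pvWitness_count_unique_ngrams.2.1 pvWitness_count_unique_ngrams.2.2 ∧
    Pre_count_unique_ngrams pvWitness_count_unique_ngrams.1 pvWitness_count_unique_ngrams.2.1 pvWitness_count_unique_ngrams.2.2 := by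
  exact ⟨by decide, Or.inl (by decide)⟩

-- the list of k-grams of l in text order, and their concatenation for gram length m down to 1
def pvWin (l : List Char) (k : Nat) : List (List Char) :=
  (List.range (l.length + 1 - k)).map (fun j => (l.drop j).take k)

def pvKcat (l : List Char) : Nat → List String
  | 0 => []
  | m + 1 => (pvWin l (m + 1)).map (fun w => String.ofList w) ++ pvKcat l m

-- heads of the suffixes l[0:], …, l[m-1:] are l.take m
theorem pvHeads_eq (t : List Char) (m : Nat) (h : m ≤ t.length) :
    (List.range m).map (fun j => (t.drop j).headD ' ') = t.take m := by
  apply List.ext_getElem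
  · simp [h]
  · intro i h1 h2
    simp only [List.getElem_map, List.getElem_range, List.getElem_take]
    have hi : i < t.length := by simp at h1; omega
    rw [List.headD_eq_head?_getD, List.head?_drop, List.getElem?_eq_getElem hi]
    rfl

-- the 1-windows are the singletons
theorem pvWin_one (l : List Char) : pvWin l 1 = l.map (fun c => [c]) := by
  apply List.ext_getElem
  · simp [pvWin]
  · intro i h1 h2
    simp only [pvWin, List.getElem_map, List.getElem_range]
    have hi : i < l.length := by simp at h2; omega
    rw [List.take_one, List.head?_drop, List.getElem?_eq_getElem hi]
    rfl

theorem pvWin_cons (c : Char) (t : List Char) (m : Nat) (hm : m ≤ t.length) :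
    pvWin (c :: t) (m + 1) = (c :: t.take m) :: pvWin t (m + 1) := by
  have hlen : (c :: t).length + 1 - (m + 1) = (t.length + 1 - (m + 1)) + 1 := by
    simp only [List.length_cons]; omega
  simp only [pvWin, hlen, List.range_succ_eq_map, List.map_cons, List.map_map]
  congr 1

-- zip over the suffixes l[0:], l[1:], …, l[m:] yields the (m+1)-windows of l
theorem pvZipHeads_eq (l : List Char) (m : Nat) :
    pvZipHeads l ((List.range' 1 m).map (fun i => l.drop i)) = pvWin l (m + 1) := by
  induction l with
  | nil => cases m <;> simp [pvZipHeads, pvWin]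
  | cons c t ih =>
    have hrest : (List.range' 1 m).map (fun i => (c :: t).drop i)
        = (List.range m).map (fun j => t.drop j) := by
      rw [List.range'_eq_map_range, List.map_map]
      exact List.map_congr_left (fun j _ => by simp [Nat.add_comm 1 j])
    rw [pvZipHeads, hrest]
    by_cases hm : m ≤ t.length
    · have hall : ((List.range m).map (fun j => t.drop j)).all (fun l => !l.isEmpty) = true := by
        simp only [List.all_eq_true, List.mem_map, List.mem_range]
        rintro x ⟨j, hj, rfl⟩
        simp [List.drop_eq_nil_iff]
        omega
      rw [hall]
      simp only [if_true]
      have hheads : ((List.range m).map (fun j => t.drop j)).map (fun l => l.headD ' ')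
          = t.take m := by rw [List.map_map]; exact pvHeads_eq t m hm
      have htails : ((List.range m).map (fun j => t.drop j)).map List.tail
          = (List.range' 1 m).map (fun i => t.drop i) := by
        rw [List.map_map, List.range'_eq_map_range, List.map_map]
        exact List.map_congr_left (fun j _ => by simp [List.tail_drop, Nat.add_comm 1 j])
      rw [hheads, htails, ih, pvWin_cons c t m hm]
    · have hall : ((List.range m).map (fun j => t.drop j)).all (fun l => !l.isEmpty) = false := by
        apply List.all_eq_false.mpr
        exact ⟨t.drop t.length, List.mem_map.mpr ⟨t.length, List.mem_range.mpr (by omega), rfl⟩, by simp⟩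
      rw [hall]
      simp only [Bool.false_eq_true, if_false, pvWin]
      have h0 : (c :: t).length + 1 - (m + 1) = 0 := by simp only [List.length_cons]; omega
      rw [h0]
      simp

-- updating with a deduplicated list updates with the list itself
theorem pvUpdate_ofList {α : Type} [BEq α] [LawfulBEq α] (s : PySem.Set α) (ys : List α) :
    s.update (PySem.Set.ofList ys) = s.update ys := by
  rw [PySem.Set.update_eq_append_filter, PySem.Set.update_eq_append_filter, PySem.Set.ofList_ofList]

-- A's ngrams(s, n) is the deduplicated concatenation of the k-windows, k = n down to 1
theorem pvNgrams_eq_aux (s : String) (m : Nat) :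
    pvNgrams s ((m : Int) + 1) = PySem.Set.ofList (pvKcat s.toList (m + 1)) := by
  induction m with
  | zero =>
    rw [pvNgrams]
    simp only [Int.natCast_zero, Int.zero_add, le_refl, dif_pos]
    rw [pvKcat, pvKcat, pvWin_one, List.map_map, List.append_nil]
    rfl
  | succ k ih =>
    rw [pvNgrams]
    have hgt : ¬ ((k + 1 : Nat) : Int) + 1 ≤ 1 := by push_cast; omega
    rw [dif_neg hgt]
    have htn : (((k + 1 : Nat) : Int) + 1).toNat - 1 = k + 1 := by omega
    have hn1 : ((k + 1 : Nat) : Int) + 1 - 1 = (k : Int) + 1 := by push_cast; ring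
    rw [htn, hn1, ih, pvZipHeads_eq]
    show (PySem.Set.ofList ((pvWin s.toList (k + 1 + 1)).map (fun w => String.ofList w))).update
        (PySem.Set.ofList (pvKcat s.toList (k + 1))) = _
    rw [pvUpdate_ofList, ← PySem.Set.ofList_append]
    rfl

theorem pvNgrams_eq (s : String) (n : Int) (h : 1 ≤ n) :
    pvNgrams s n = PySem.Set.ofList (pvKcat s.toList n.toNat) := by
  obtain ⟨m, hm⟩ : ∃ m : Nat, n = (m : Int) + 1 := ⟨n.toNat - 1, by omega⟩
  subst hm
  rw [pvNgrams_eq_aux]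
  congr 1

-- windows longer than the line are empty, so the concatenation only depends on min n len
theorem pvKcat_min (l : List Char) (m : Nat) : pvKcat l m = pvKcat l (min m l.length) := by
  induction m with
  | zero => simp [pvKcat]
  | succ k ih =>
    by_cases h : k + 1 ≤ l.length
    · rw [Nat.min_eq_left h]
    · have hwin : pvWin l (k + 1) = [] := by
        simp only [pvWin]
        have h0 : l.length + 1 - (k + 1) = 0 := by omega
        rw [h0]; simp
      rw [pvKcat, hwin, List.map_nil, List.nil_append, ih]
      congr 1
      omega

-- B's inner slicing loop for gram length k collects exactly the k-windows
theorem pvGrams_inner (line : String) (k : Nat) (hkl : k ≤ line.toList.length)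
    (gs : PySem.Set String) :
    (PySem.List.pyRange 0 (PySem.Str.len line - (k : Int) + 1) 1).foldl
      (fun gs j => PySem.Set.add gs (PySem.Str.slice line (some j) (some (j + (k : Int))))) gs
    = gs.update ((pvWin line.toList k).map (fun w => String.ofList w)) := by
  rw [PySem.List.pyRange_one, List.foldl_map, ← PySem.Set.update_map_eq_foldl_add]
  congr 1
  have hlen : (PySem.Str.len line - (k : Int) + 1 - 0).toNat = line.toList.length + 1 - k := by
    simp only [PySem.Str.len_eq]; omega
  rw [hlen]
  unfold pvWin
  rw [List.map_map]
  apply List.map_congr_left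
  intro j _
  show PySem.Str.slice line (some (0 + (j : Int))) (some (0 + (j : Int) + (k : Int)))
      = String.ofList ((line.toList.drop j).take k)
  rw [Int.zero_add]
  unfold PySem.Str.slice
  congr 1
  rw [PySem.Chars.slice_eq_listSlice, PySem.List.slice_natCast_add]

-- B's outer loop, for gram lengths k down to 1
theorem pvGrams_loop (line : String) (k : Nat) (hkl : k ≤ line.toList.length)
    (gs : PySem.Set String) :
    (PySem.List.pyRange (k : Int) 0 (-1)).foldl
      (fun gs k =>
        (PySem.List.pyRange 0 (PySem.Str.len line - k + 1) 1).foldl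
          (fun gs j => PySem.Set.add gs (PySem.Str.slice line (some j) (some (j + k)))) gs) gs
    = gs.update (pvKcat line.toList k) := by
  induction k generalizing gs with
  | zero => rw [PySem.List.pyRange_neg_one_eq_nil (by omega)]; simp [pvKcat]
  | succ k ih =>
    rw [PySem.List.pyRange_neg_one_cons (by omega), List.foldl_cons]
    have hc : ((k + 1 : Nat) : Int) - 1 = (k : Int) := by push_cast; ring
    rw [hc, pvGrams_inner line (k + 1) hkl, ih (by omega), pvKcat,
      PySem.Set.update_append]

theorem pvGrams_eq (s : String) (n : Int) (h : 0 ≤ n) :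
    pvGrams s n = PySem.Set.ofList (pvKcat s.toList (min n (s.toList.length : Int)).toNat) := by
  unfold pvGrams
  have hmin : min n (PySem.Str.len s) = ((min n (s.toList.length : Int)).toNat : Int) := by
    simp only [PySem.Str.len_eq]; omega
  rw [hmin, pvGrams_loop s _ (by omega), PySem.Set.update_empty]

-- the two gram generators agree
theorem pvGrams_eq_ngrams (s : String) (n : Int) (h : 1 ≤ n) :
    pvNgrams s n = pvGrams s n := by
  rw [pvNgrams_eq s n h, pvGrams_eq s n (by omega), pvKcat_min]
  congr 2
  omega

theorem pvItemsErase (d : PySem.Dict String (PySem.Set Int)) (c : String) :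
    (d.erase c).items = d.items.filter (fun p => !(p.1 == c)) := rfl

theorem pvKeysEraseNodup (d : PySem.Dict String (PySem.Set Int)) (c : String)
    (hd : d.keys.Nodup) : (d.erase c).keys.Nodup := by
  have : (d.erase c).keys.Sublist d.keys :=
    List.Sublist.map Prod.fst (List.filter_sublist (l := d.items))
  exact hd.sublist this

theorem pvMemKeysErase (d : PySem.Dict String (PySem.Set Int)) (c c' : String)
    (h : c' ∈ d.keys) (hne : c' ≠ c) : c' ∈ (d.erase c).keys := by
  rcases List.mem_map.mp h with ⟨q, hq, rfl⟩
  exact List.mem_map.mpr ⟨q, List.mem_filter.mpr ⟨hq, by simp [hne]⟩, rfl⟩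

-- the deletion pass over the keys of a dict with distinct keys is a filter of its items
theorem pvEraseFold (t : Int) (ks : List String) (d : PySem.Dict String (PySem.Set Int))
    (hd : d.keys.Nodup) (hks : ks.Nodup) (hsub : ∀ c ∈ ks, c ∈ d.keys) :
    (ks.foldl (fun d c => if PySem.Set.len (PySem.Dict.getD d c PySem.Set.empty) < t then d.erase c else d) d).items
    = d.items.filter (fun p => !(decide (p.1 ∈ ks) && decide (PySem.Set.len p.2 < t))) := by
  induction ks generalizing d with
  | nil => simp
  | cons c ks' ih =>
    have hc : c ∈ d.keys := hsub c (List.mem_cons_self)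
    rcases List.mem_map.mp hc with ⟨q, hq, hq1⟩
    have hqv : (c, q.2) ∈ d.items := by rw [← hq1]; rwa [Prod.mk.eta]
    have hgd : PySem.Dict.getD d c PySem.Set.empty = q.2 :=
      PySem.Dict.getD_of_mem_items d hqv hd _
    have huniq : ∀ p ∈ d.items, p.1 = c → p.2 = q.2 := by
      intro p hp hp1
      have h1 : d.get? c = some q.2 := PySem.Dict.get?_of_mem_items d hqv hd
      have h2 : d.get? c = some p.2 := by
        apply PySem.Dict.get?_of_mem_items d _ hd
        rw [← hp1]; rwa [Prod.mk.eta]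
      rw [h1] at h2; exact (Option.some_inj.mp h2).symm
    have hcks : c ∉ ks' := (List.nodup_cons.mp hks).1
    rw [List.foldl_cons, hgd]
    by_cases hlt : PySem.Set.len q.2 < t
    · rw [if_pos hlt]
      rw [ih (d.erase c) (pvKeysEraseNodup d c hd) (List.nodup_cons.mp hks).2
        (fun c' h => pvMemKeysErase d c c' (hsub c' (List.mem_cons_of_mem c h))
          (fun he => hcks (he ▸ h)))]
      rw [pvItemsErase, List.filter_filter]
      apply List.filter_congr
      intro p hp
      by_cases hpc : p.1 = c
      · have := huniq p hp hpc
        have hlt' : ((List.length q.2 : Int)) < t := hlt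
        simp [hpc, this, hlt']
      · simp [hpc, List.mem_cons]
    · rw [if_neg hlt]
      rw [ih d hd (List.nodup_cons.mp hks).2 (fun c' h => hsub c' (List.mem_cons_of_mem c h))]
      apply List.filter_congr
      intro p hp
      by_cases hpc : p.1 = c
      · have := huniq p hp hpc
        have hlt' : ¬ ((List.length q.2 : Int)) < t := hlt
        simp [hpc, this, hlt', hcks]
      · simp [hpc, List.mem_cons]

-- keys stay distinct through B's builder loop
theorem pvBuilderNodup (n : Int) (ps : List (Int × String)) (d : PySem.Dict String (PySem.Set Int))
    (hd : d.keys.Nodup) :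
    (ps.foldl (fun d p => (pvGrams p.2 n).foldl
      (fun d g => PySem.Dict.insert d g (PySem.Set.add (PySem.Dict.getD d g PySem.Set.empty) p.1)) d) d).keys.Nodup := by
  induction ps generalizing d with
  | nil => exact hd
  | cons p ps ih =>
    exact ih _ (PySem.Dict.nodup_keys_foldl_insert (pvGrams p.2 n)
      (fun d g => PySem.Set.add (PySem.Dict.getD d g PySem.Set.empty) p.1) d hd)

theorem pvMain (lines : List String) (n : Int) (threshold : Option Int)
    (hpre : 1 ≤ n ∨ lines = []) :
    count_unique_ngrams lines n threshold = count_unique_ngrams_alt lines n threshold := by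
  rcases hpre with hn | hl
  · unfold count_unique_ngrams count_unique_ngrams_alt
    have hfun : (fun (d : PySem.Dict String (PySem.Set Int)) (p : Int × String) =>
        (pvNgrams p.2 n).foldl
          (fun d g => PySem.Dict.modify d g PySem.Set.empty (fun s => PySem.Set.add s p.1)) d)
      = (fun (d : PySem.Dict String (PySem.Set Int)) (p : Int × String) =>
        (pvGrams p.2 n).foldl
          (fun d g => PySem.Dict.insert d g (PySem.Set.add (PySem.Dict.getD d g PySem.Set.empty) p.1)) d) := by
      funext d p
      rw [pvGrams_eq_ngrams p.2 n hn]
      rfl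
    rw [hfun]
    set C : PySem.Dict String (PySem.Set Int) :=
      (PySem.List.enumerate lines 0).foldl
        (fun d p => (pvGrams p.2 n).foldl
          (fun d g => PySem.Dict.insert d g (PySem.Set.add (PySem.Dict.getD d g PySem.Set.empty) p.1)) d)
        PySem.Dict.empty with hC
    cases threshold with
    | none => rfl
    | some t =>
      have hnd : C.keys.Nodup := by
        rw [hC]; exact pvBuilderNodup n _ _ PySem.Dict.nodup_keys_empty
      show (C.keys.foldl _ C).items = C.items.filter _
      rw [pvEraseFold t C.keys C hnd hnd (fun c h => h)]
      apply List.filter_congr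
      intro p hp
      have hpk : p.1 ∈ C.keys := List.mem_map.mpr ⟨p, hp, rfl⟩
      by_cases hx : ((p.2.length : Int)) < t
      · simp [hpk, hx, show ¬ t ≤ ((p.2.length : Int)) from by omega]
      · simp [hpk, hx, show t ≤ ((p.2.length : Int)) from by omega]
  · subst hl
    cases threshold <;> rfl

-- ===== VERDICT (by name: the statement is the Claim_ definition above) =====
theorem count_unique_ngrams_spec : Claim_equal_count_unique_ngrams := by
  intro lines n threshold _ hpre
  exact pvMain lines n threshold hpre
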